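-- pv_equiv track=rewrite | github.com/ShohamGalili/Formal_Verification_Final_Project | Codes/solve_iteratively.py | extract_lines_between_states
-- ===== SOURCE A (Python) =====
-- def extract_lines_between_states(output):
--     """
--     Extract the lines between the states from the output of nuXmv.
--     This is a generator function.
--     :param output: the output of nuXmv
--     :return: the lines between the states
--     """
--     # a list to hold the lines between the states
--     lines_between_states = []
--     # a flag to indicate if we are between states
--     start = False
--
--     # iterate over the lines in the output
--     for line in output.split('\n'):
--         # if we find the 'State' line, we are between states
--         if 'State' in line:
--             # if we are already between states, yield the lines between the states and reset the list
--             # if not, set the flag to True because we are now between states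
--             if not start:
--                 lines_between_states = []
--                 start = True
--             else:
--                 yield lines_between_states
--                 lines_between_states = []
--         # if we are not between states, continue to the next line
--         # if we are between states, add the line to the list
--         elif start:
--             lines_between_states.append(line)
--
--     # if we are between states at the end of the file, yield the lines between the states
--     if start:
--         yield lines_between_states
-- ===== SOURCE B (Python) =====
-- def extract_lines_between_states(output):
--     """
--     Extract the lines between the states from the output of nuXmv.
--     Generator: consume the lines as a queue — skip the prefix before the
--     first 'State' marker, then repeatedly drop a marker line and collect
--     the following non-marker lines as one group.
--     """
--     lines = output.split('\n')
--     # skip everything before the first marker line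
--     while lines and 'State' not in lines[0]:
--         lines.pop(0)
--     # each iteration: drop one marker line, collect its group
--     while lines:
--         lines.pop(0)
--         group = []
--         while lines and 'State' not in lines[0]:
--             group.append(lines.pop(0))
--         yield group
-- ===== Notes on version B (the rewrite author's own statement) =====
-- stated objective: alternative
-- what changed: Replaces A's single loop with a boolean start-flag and accumulator list by a queue decomposition: skip the prefix before the first 'State' marker, then repeatedly drop a marker line and collect the following non-marker lines as one group.
import Mathlib
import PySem

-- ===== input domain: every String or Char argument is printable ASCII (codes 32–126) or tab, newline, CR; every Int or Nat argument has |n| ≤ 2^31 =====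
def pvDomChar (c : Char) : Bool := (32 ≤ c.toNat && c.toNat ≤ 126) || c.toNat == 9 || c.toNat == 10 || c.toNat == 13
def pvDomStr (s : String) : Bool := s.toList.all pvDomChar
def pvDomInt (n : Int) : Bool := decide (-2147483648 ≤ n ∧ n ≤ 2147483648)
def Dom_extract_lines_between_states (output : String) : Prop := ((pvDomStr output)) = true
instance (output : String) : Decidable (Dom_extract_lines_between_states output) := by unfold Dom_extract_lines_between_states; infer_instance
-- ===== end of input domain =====

-- B replaces A's flag-and-accumulator single loop by a queue decomposition (skip prefix,
-- then repeatedly drop a marker and collect its group); objective: alternative, same cost.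


-- ===== PORT A =====
-- one step of A's loop; state = (yielded groups, lines_between_states, start)
def pvStepA (st : List (List String) × List String × Bool) (line : String) :
    List (List String) × List String × Bool :=
  if PySem.Str.isIn "State" line then
    if !st.2.2 then (st.1, [], true)
    else (st.1 ++ [st.2.1], [], true)
  else if st.2.2 then (st.1, st.2.1 ++ [line], st.2.2)
  else st

def extract_lines_between_states (output : String) : List (List String) :=
  let r := ((PySem.Str.split? output "\n").getD []).foldl pvStepA ([], [], false)
  if r.2.2 then r.1 ++ [r.2.1] else r.1

-- ===== PORT B =====
-- first while loop of Source B: pop lines while the head is not a marker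
def pvSkip : List String → List String
  | [] => []
  | l :: ls => if PySem.Str.isIn "State" l then l :: ls else pvSkip ls

-- inner while loop of Source B: pop the group's lines, return (group, remaining queue)
def pvCollect : List String → List String × List String
  | [] => ([], [])
  | l :: ls =>
    if PySem.Str.isIn "State" l then ([], l :: ls)
    else
      let p := pvCollect ls
      (l :: p.1, p.2)

theorem pvCollect_len : ∀ ls : List String, (pvCollect ls).2.length ≤ ls.length := by
  intro ls
  induction ls with
  | nil => simp [pvCollect]
  | cons l ls ih =>
    simp only [pvCollect]
    split
    · simp
    · simpa using Nat.le_succ_of_le ih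

-- outer while loop of Source B: drop the marker line, collect and yield the group
def pvGroups : List String → List (List String)
  | [] => []
  | _ :: ls =>
    let p := pvCollect ls
    p.1 :: pvGroups p.2
termination_by ls => ls.length
decreasing_by exact Nat.lt_succ_of_le (pvCollect_len ls)

def extract_lines_between_states_alt (output : String) : List (List String) :=
  pvGroups (pvSkip ((PySem.Str.split? output "\n").getD []))

-- ===== PRECONDITION & SPEC =====
def Spec_extract_lines_between_states (output : String) (out : List (List String)) : Prop := out = extract_lines_between_states_alt output
instance (output : String) (out : List (List String)) : Decidable (Spec_extract_lines_between_states output out) := by unfold Spec_extract_lines_between_states; infer_instance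

-- ===== CLAIM (what is proved, stated in full; the proofs are below) =====
def Claim_equal_extract_lines_between_states : Prop := ∀ (output : String), Dom_extract_lines_between_states output → Spec_extract_lines_between_states output (extract_lines_between_states output)

-- ===== LEMMAS AND PROOFS =====

-- started phase: A's loop from state (res, acc, true) finalizes to res ++ (acc++group) :: rest
theorem pv_foldl_true : ∀ (ls : List String) (res : List (List String)) (acc : List String),
    (let r := ls.foldl pvStepA (res, acc, true);
     if r.2.2 then r.1 ++ [r.2.1] else r.1)
    = res ++ ((acc ++ (pvCollect ls).1) :: pvGroups (pvCollect ls).2) := by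
  intro ls
  induction ls with
  | nil => intro res acc; simp [pvCollect, pvGroups]
  | cons l ls ih =>
    intro res acc
    simp only [List.foldl_cons]
    by_cases h : PySem.Chars.isIn ['S','t','a','t','e'] l.toList = true
    · rw [show pvStepA (res, acc, true) l = (res ++ [acc], [], true) by simp [pvStepA, h]]
      rw [ih]
      simp [pvCollect, pvGroups, h]
    · rw [show pvStepA (res, acc, true) l = (res, acc ++ [l], true) by simp [pvStepA, h]]
      rw [ih]
      simp [pvCollect, h]

-- not-started phase: A's loop from the initial state equals B on the skipped queue
theorem pv_foldl_false : ∀ ls : List String,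
    (let r := ls.foldl pvStepA ([], [], false);
     if r.2.2 then r.1 ++ [r.2.1] else r.1)
    = pvGroups (pvSkip ls) := by
  intro ls
  induction ls with
  | nil => simp [pvSkip, pvGroups]
  | cons l ls ih =>
    simp only [List.foldl_cons]
    by_cases h : PySem.Chars.isIn ['S','t','a','t','e'] l.toList = true
    · rw [show pvStepA ([], [], false) l = ([], [], true) by simp [pvStepA, h]]
      rw [pv_foldl_true ls [] []]
      simp [pvSkip, pvGroups, h]
    · rw [show pvStepA ([], [], false) l = ([], [], false) by simp [pvStepA, h]]
      rw [ih]
      simp [pvSkip, h]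

-- ===== VERDICT (by name: the statement is the Claim_ definition above) =====
theorem extract_lines_between_states_spec : Claim_equal_extract_lines_between_states := by
  intro output _
  unfold Spec_extract_lines_between_states extract_lines_between_states extract_lines_between_states_alt
  exact pv_foldl_false ((PySem.Str.split? output "\n").getD [])
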